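-- pv_equiv track=rewrite | github.com/DiTo97/alphacodings | src/python/alphacodings.py | base26_encode
-- ===== SOURCE A (Python) =====
-- def base26_encode(string: str) -> str:
--     base256_int = 0
--
--     for character in string:
--         base256_int = base256_int * 256 + ord(character)
--
--     if base256_int == 0:
--         return "A"  # empty input or input that equals 0
--
--     base26_str = ""
--
--     while base256_int > 0:
--         base26_str = chr(base256_int % 26 + 65) + base26_str
--         base256_int //= 26
--
--     return base26_str
-- ===== SOURCE B (Python) =====
-- def base26_encode(string: str) -> str:
--     n = int.from_bytes(string.encode("latin-1"), "big")
--
--     if n == 0: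
--         return "A"  # empty input or input that equals 0
--
--     e = 0
--     while 26 ** (2 ** e) <= n:
--         e += 1
--
--     def rec(m: int, k: int) -> list:
--         if k == 0:
--             return [chr(65 + m)]
--         p = 26 ** (2 ** (k - 1))
--         q, r = divmod(m, p)
--         return rec(q, k - 1) + rec(r, k - 1)
--
--     return "".join(rec(n, e)).lstrip("A")
-- ===== Notes on version B (the rewrite author's own statement) =====
-- stated objective: faster
-- what changed: Replaces the digit-at-a-time while loop (one big-int divmod per output character) with divide-and-conquer base conversion: recursively split the integer by squared powers 26^(2^k), emitting padded digit blocks, then strip the leading padding.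
import Mathlib
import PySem

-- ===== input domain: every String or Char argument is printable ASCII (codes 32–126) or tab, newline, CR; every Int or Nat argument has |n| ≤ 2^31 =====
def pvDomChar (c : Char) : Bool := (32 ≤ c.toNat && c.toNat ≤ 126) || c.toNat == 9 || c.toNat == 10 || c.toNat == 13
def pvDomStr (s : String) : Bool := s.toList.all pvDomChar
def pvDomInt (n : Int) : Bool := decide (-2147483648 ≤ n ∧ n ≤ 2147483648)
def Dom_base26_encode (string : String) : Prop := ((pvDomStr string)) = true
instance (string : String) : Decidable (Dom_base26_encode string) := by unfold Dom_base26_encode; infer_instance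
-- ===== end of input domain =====

-- B replaces A's digit-at-a-time divmod loop with divide-and-conquer base conversion
-- (split by squared powers 26^(2^k), strip the 'A' padding); measured faster. Return value only.

-- ===== PORT A =====
-- the while loop: prepend chr(n % 26 + 65), n //= 26
def pvALoop (n : Nat) (s : List Char) : List Char :=
  if h : 0 < n then pvALoop (n / 26) (Char.ofNat (n % 26 + 65) :: s) else s
  termination_by n
  decreasing_by exact Nat.div_lt_self h (by norm_num)

def base26_encode (string : String) : String :=
  let n := string.toList.foldl (fun acc c => acc * 256 + c.toNat) 0
  if n = 0 then "A" else String.mk (pvALoop n [])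

-- ===== PORT B =====
-- while 26 ** (2 ** e) <= n: e += 1
def pvFindE (n e : Nat) : Nat :=
  if h : 26 ^ (2 ^ e) ≤ n then pvFindE n (e + 1) else e
  termination_by n + 1 - 2 ^ e
  decreasing_by
    have h1 : 2 ^ e ≤ 26 ^ (2 ^ e) := Nat.le_trans (Nat.le_of_lt (Nat.lt_two_pow_self)) (Nat.pow_le_pow_left (by norm_num) _)
    have h2 : (2 : Nat) ^ e < 2 ^ (e + 1) := Nat.pow_lt_pow_succ (by norm_num)
    omega

-- rec(m, k): split by p = 26^(2^(k-1))
def pvBRec (m : Nat) : Nat → List Char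
  | 0 => [Char.ofNat (65 + m)]
  | k + 1 =>
    let p := 26 ^ (2 ^ k)
    pvBRec (m / p) k ++ pvBRec (m % p) k

def base26_encode_alt (string : String) : String :=
  let n := string.toList.foldl (fun acc c => acc * 256 + c.toNat) 0  -- int.from_bytes(s.encode('latin-1'), 'big')
  if n = 0 then "A"
  else String.mk (List.dropWhile (· == 'A') (pvBRec n (pvFindE n 0)))  -- ''.join(...).lstrip('A'), ported by hand (exact)

-- ===== PRECONDITION & SPEC =====
def Spec_base26_encode (string : String) (out : String) : Prop := out = base26_encode_alt string
instance (string : String) (out : String) : Decidable (Spec_base26_encode string out) := by unfold Spec_base26_encode; infer_instance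

-- ===== CLAIM (what is proved, stated in full; the proofs are below) =====
def Claim_equal_base26_encode : Prop := ∀ (string : String), Dom_base26_encode string → Spec_base26_encode string (base26_encode string)

-- ===== LEMMAS AND PROOFS =====

-- most-significant-digit-first base-26 digit string of n ([] for 0)
def pvMsd (n : Nat) : List Char :=
  if h : 0 < n then pvMsd (n / 26) ++ [Char.ofNat (n % 26 + 65)] else []
  termination_by n
  decreasing_by exact Nat.div_lt_self h (by norm_num)

def pvPad (t : Nat) (l : List Char) : List Char := List.replicate (t - l.length) 'A' ++ l

theorem pvMsd_zero : pvMsd 0 = [] := by unfold pvMsd; simp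

theorem pvMsd_pos {n : Nat} (h : 0 < n) :
    pvMsd n = pvMsd (n / 26) ++ [Char.ofNat (n % 26 + 65)] := by
  rw [pvMsd]; simp [h]

theorem pvALoop_eq (n : Nat) : ∀ s, pvALoop n s = pvMsd n ++ s := by
  induction n using Nat.strong_induction_on with
  | _ n ih =>
    intro s
    by_cases h : 0 < n
    · rw [pvALoop, pvMsd]
      simp only [h, dif_pos]
      rw [ih (n / 26) (Nat.div_lt_self h (by norm_num))]
      simp
    · rw [pvALoop, pvMsd]; simp [h]

theorem pvMsd_length {t : Nat} : ∀ {n : Nat}, n < 26 ^ t → (pvMsd n).length ≤ t := by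
  induction t with
  | zero => intro n h; interval_cases n; simp [pvMsd_zero]
  | succ t ih =>
    intro n h
    by_cases hn : 0 < n
    · rw [pvMsd_pos hn]
      have : n / 26 < 26 ^ t := by
        rw [Nat.div_lt_iff_lt_mul (by norm_num)]
        calc n < 26 ^ (t + 1) := h
        _ = 26 ^ t * 26 := by ring
      have := ih this
      simp [List.length_append]; omega
    · simp at hn; subst hn; simp [pvMsd_zero]

theorem pvCharA : Char.ofNat 65 = 'A' := by decide

-- splitting lemma: digits of q*26^t + r, q > 0, r < 26^t
theorem pvMsd_split : ∀ (t q r : Nat), 0 < q → r < 26 ^ t →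
    pvMsd (q * 26 ^ t + r) = pvMsd q ++ pvPad t (pvMsd r) := by
  intro t
  induction t with
  | zero =>
    intro q r hq hr
    interval_cases r
    simp [pvPad, pvMsd_zero]
  | succ t ih =>
    intro q r hq hr
    have hn : 0 < q * 26 ^ (t + 1) + r := by positivity
    rw [pvMsd_pos hn]
    have hrw : q * 26 ^ (t + 1) + r = 26 * (q * 26 ^ t) + r := by ring
    have hdiv : (q * 26 ^ (t + 1) + r) / 26 = q * 26 ^ t + r / 26 := by
      rw [hrw, Nat.mul_add_div (by norm_num)]
    have hmod : (q * 26 ^ (t + 1) + r) % 26 = r % 26 := by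
      rw [hrw, Nat.mul_add_mod]
    have hr' : r / 26 < 26 ^ t := by
      rw [Nat.div_lt_iff_lt_mul (by norm_num)]
      calc r < 26 ^ (t + 1) := hr
      _ = 26 ^ t * 26 := by ring
    rw [hdiv, hmod, ih q (r / 26) hq hr']
    have key : pvPad (t + 1) (pvMsd r) = pvPad t (pvMsd (r / 26)) ++ [Char.ofNat (r % 26 + 65)] := by
      by_cases hr0 : 0 < r
      · have hrl := pvMsd_length hr'
        rw [pvMsd_pos hr0]
        simp only [pvPad, List.length_append, List.length_cons, List.length_nil]
        rw [show t + 1 - ((pvMsd (r / 26)).length + (0 + 1)) = t - (pvMsd (r / 26)).length from by omega]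
        simp [List.append_assoc]
      · have : r = 0 := by omega
        subst this
        simp [pvMsd_zero, pvPad, List.replicate_succ' (n := t), pvCharA]
    rw [key, List.append_assoc]

theorem pvPad_concat (m : Nat) (l1 l2 : List Char) (h1 : l1.length ≤ m) (h2 : l2.length = m) :
    pvPad m l1 ++ l2 = pvPad (m + m) (l1 ++ l2) := by
  simp only [pvPad, List.length_append, h2]
  rw [show m + m - (l1.length + m) = m - l1.length from by omega]
  simp [List.append_assoc]

theorem pvBRec_eq : ∀ (e n : Nat), n < 26 ^ (2 ^ e) → pvBRec n e = pvPad (2 ^ e) (pvMsd n) := by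
  intro e
  induction e with
  | zero =>
    intro n h
    simp only [pow_zero, pow_one] at h
    by_cases hn : 0 < n
    · have h26 : n / 26 = 0 := Nat.div_eq_of_lt h
      have hm : n % 26 = n := Nat.mod_eq_of_lt h
      simp [pvBRec, pvMsd_pos hn, h26, hm, pvMsd_zero, pvPad, Nat.add_comm 65 n]
    · have : n = 0 := by omega
      subst this
      rw [pvMsd_zero]
      show [Char.ofNat (65 + 0)] = pvPad (2 ^ 0) []
      simp [pvPad, pvCharA]
  | succ e ih =>
    intro n h
    have hppos : 0 < 26 ^ (2 ^ e) := by positivity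
    have hpp : 26 ^ (2 ^ (e + 1)) = 26 ^ (2 ^ e) * 26 ^ (2 ^ e) := by
      rw [← pow_add]; congr 1; rw [pow_succ]; ring
    have hq : n / 26 ^ (2 ^ e) < 26 ^ (2 ^ e) := by
      rw [Nat.div_lt_iff_lt_mul hppos]; rw [hpp] at h; exact h
    have hrp : n % 26 ^ (2 ^ e) < 26 ^ (2 ^ e) := Nat.mod_lt _ hppos
    have hlr : (pvPad (2 ^ e) (pvMsd (n % 26 ^ (2 ^ e)))).length = 2 ^ e := by
      have := pvMsd_length hrp
      simp [pvPad]; omega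
    have h2 : 2 ^ (e + 1) = 2 ^ e + 2 ^ e := by rw [pow_succ]; ring
    show pvBRec (n / 26 ^ (2 ^ e)) e ++ pvBRec (n % 26 ^ (2 ^ e)) e = _
    rw [ih _ hq, ih _ hrp]
    by_cases hq0 : 0 < n / 26 ^ (2 ^ e)
    · have hsplit := pvMsd_split (2 ^ e) (n / 26 ^ (2 ^ e)) (n % 26 ^ (2 ^ e)) hq0 hrp
      rw [show n / 26 ^ (2 ^ e) * 26 ^ (2 ^ e) + n % 26 ^ (2 ^ e) = n from Nat.div_add_mod' n _] at hsplit
      rw [hsplit, h2]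
      exact pvPad_concat (2 ^ e) _ _ (pvMsd_length hq) hlr
    · have hn0 : n / 26 ^ (2 ^ e) = 0 := Nat.eq_zero_of_not_pos hq0
      have hnlt : n < 26 ^ (2 ^ e) := by
        rcases (Nat.div_eq_zero_iff).mp hn0 with h' | h'
        · omega
        · exact h'
      have hnr : n % 26 ^ (2 ^ e) = n := Nat.mod_eq_of_lt hnlt
      have hln : (pvMsd n).length ≤ 2 ^ e := pvMsd_length hnlt
      rw [hn0, hnr, pvMsd_zero, h2]
      simp only [pvPad, List.length_nil, Nat.sub_zero, List.append_nil, ← List.append_assoc,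
        ← List.replicate_add]
      congr 2
      omega

theorem pvFindE_lt (n e : Nat) : n < 26 ^ (2 ^ (pvFindE n e)) := by
  fun_induction pvFindE n e with
  | case1 e h ih => exact ih
  | case2 e h => omega

theorem pvMsd_noLeadA : ∀ n, 0 < n → List.dropWhile (· == 'A') (pvMsd n) = pvMsd n := by
  intro n
  induction n using Nat.strong_induction_on with
  | _ n ih =>
    intro hn
    rw [pvMsd_pos hn]
    by_cases h26 : n < 26
    · have : n / 26 = 0 := Nat.div_eq_of_lt h26
      rw [this, pvMsd_zero, Nat.mod_eq_of_lt h26]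
      simp only [List.nil_append, List.dropWhile_cons]
      have : (Char.ofNat (n + 65) == 'A') = false := by
        interval_cases n <;> decide
      simp [this]
    · have hq : 0 < n / 26 := Nat.div_pos (by omega) (by norm_num)
      have ihq := ih (n / 26) (Nat.div_lt_self hn (by norm_num)) hq
      rw [List.dropWhile_append, ihq]
      have hne : pvMsd (n / 26) ≠ [] := by
        rw [pvMsd_pos hq]; simp
      simp [List.isEmpty_iff, hne]

theorem pvDrop_replicate (k : Nat) (l : List Char) :
    List.dropWhile (· == 'A') (List.replicate k 'A' ++ l) = List.dropWhile (· == 'A') l := by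
  induction k with
  | zero => simp
  | succ k ih => simp [List.replicate_succ, ih]

-- ===== VERDICT (by name: the statement is the Claim_ definition above) =====
theorem base26_encode_spec : Claim_equal_base26_encode := by
  intro s _
  unfold Spec_base26_encode base26_encode base26_encode_alt
  simp only
  set n := s.toList.foldl (fun acc c => acc * 256 + c.toNat) 0 with hn
  by_cases h0 : n = 0
  · simp [h0]
  · simp only [h0, if_false]
    rw [pvALoop_eq, List.append_nil]
    rw [pvBRec_eq (pvFindE n 0) n (pvFindE_lt n 0)]
    unfold pvPad
    rw [pvDrop_replicate, pvMsd_noLeadA n (by omega)]
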